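-- pv_equiv track=rewrite | github.com/pypi-data/pypi-mirror-398 | packages/cryptocoreedu/cryptocoreedu-2.0.2-py3-none-any.whl/cryptocoreedu/mac/hmac.py | verify_hmac
-- ===== SOURCE A (Python) =====
-- def verify_hmac(expected_hmac: str, computed_hmac: str) -> bool:
--     """
--     Проверка HMAC на соответствие ожидаемому значению.
--
--     Args:
--         expected_hmac (str): Ожидаемый HMAC.
--         computed_hmac (str): Вычисленный HMAC.
--
--     Returns:
--         bool: True если HMAC совпадают, иначе False.
--     """
--     expected_hmac = expected_hmac.lower().strip()
--     computed_hmac = computed_hmac.lower().strip()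
--
--     if len(expected_hmac) != len(computed_hmac):
--         return False
--
--     result = 0
--     for a, b in zip(expected_hmac, computed_hmac):
--         result |= ord(a) ^ ord(b)
--
--     return result == 0
-- ===== SOURCE B (Python) =====
-- def verify_hmac(expected_hmac: str, computed_hmac: str) -> bool:
--     """Same result: normalize both strings and compare them directly."""
--     return expected_hmac.lower().strip() == computed_hmac.lower().strip()
-- ===== Notes on version B (the rewrite author's own statement) =====
-- stated objective: simpler
-- what changed: Replaced the length guard plus XOR-accumulator loop over zipped characters with a single direct equality comparison of the two normalized strings (B drops A's constant-time property, which does not affect the return value).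
import Mathlib
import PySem

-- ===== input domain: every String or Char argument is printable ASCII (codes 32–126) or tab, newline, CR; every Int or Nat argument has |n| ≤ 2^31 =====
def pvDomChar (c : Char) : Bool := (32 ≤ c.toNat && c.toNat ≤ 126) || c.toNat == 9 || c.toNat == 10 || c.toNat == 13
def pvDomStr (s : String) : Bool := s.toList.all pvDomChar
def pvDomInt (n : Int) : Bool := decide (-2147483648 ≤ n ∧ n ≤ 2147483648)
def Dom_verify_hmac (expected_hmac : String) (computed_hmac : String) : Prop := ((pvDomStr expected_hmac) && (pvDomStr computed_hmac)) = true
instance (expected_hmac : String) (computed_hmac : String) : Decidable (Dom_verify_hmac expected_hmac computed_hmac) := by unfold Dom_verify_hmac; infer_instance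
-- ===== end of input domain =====

-- B replaces A's length guard + XOR-accumulator loop by a direct equality test of the
-- normalized strings (return value identical; A's constant-time property is not about the value).

-- ===== PORT A =====
-- expected/computed normalized with .lower().strip(); length guard; result |= ord(a) ^ ord(b) over zip; result == 0
def verify_hmac (expected_hmac : String) (computed_hmac : String) : Bool :=
  let e := PySem.Chars.strip (PySem.Chars.lower expected_hmac.toList)
  let c := PySem.Chars.strip (PySem.Chars.lower computed_hmac.toList)
  if e.length ≠ c.length then false
  else
    let result : Int :=
      (e.zip c).foldl (fun r p => PySem.Int.bor r (PySem.Int.bxor (p.1.toNat : Int) (p.2.toNat : Int))) 0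
    result == 0

-- ===== PORT B =====
def verify_hmac_alt (expected_hmac : String) (computed_hmac : String) : Bool :=
  PySem.Chars.strip (PySem.Chars.lower expected_hmac.toList)
    == PySem.Chars.strip (PySem.Chars.lower computed_hmac.toList)

-- ===== PRECONDITION & SPEC =====
def Spec_verify_hmac (expected_hmac : String) (computed_hmac : String) (out : Bool) : Prop := out = verify_hmac_alt expected_hmac computed_hmac
instance (expected_hmac : String) (computed_hmac : String) (out : Bool) : Decidable (Spec_verify_hmac expected_hmac computed_hmac out) := by unfold Spec_verify_hmac; infer_instance

-- ===== CLAIM (what is proved, stated in full; the proofs are below) =====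
def Claim_equal_verify_hmac : Prop := ∀ (expected_hmac : String) (computed_hmac : String), Dom_verify_hmac expected_hmac computed_hmac → Spec_verify_hmac expected_hmac computed_hmac (verify_hmac expected_hmac computed_hmac)

-- ===== LEMMAS AND PROOFS =====

-- the loop invariant: the OR-accumulated value is 0 iff the accumulator is 0 and every zipped pair is equal
theorem hmac_foldl_zero_iff (l : List (Char × Char)) (r : Nat) :
    l.foldl (fun r p => PySem.Int.bor r (PySem.Int.bxor (p.1.toNat : Int) (p.2.toNat : Int))) (r : Int) = 0
      ↔ r = 0 ∧ ∀ p ∈ l, p.1 = p.2 := by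
  induction l generalizing r with
  | nil => simp
  | cons hd tl ih =>
    simp only [List.foldl_cons, List.mem_cons]
    have hacc : PySem.Int.bor (r : Int) (PySem.Int.bxor (hd.1.toNat : Int) (hd.2.toNat : Int))
        = ((r ||| (hd.1.toNat ^^^ hd.2.toNat) : Nat) : Int) := by
      simp [PySem.Int.bxor_natCast, PySem.Int.bor_natCast]
    rw [hacc, ih (r ||| (hd.1.toNat ^^^ hd.2.toNat))]
    constructor
    · rintro ⟨h0, hall⟩
      have hr : r = 0 := Nat.le_antisymm (h0 ▸ Nat.left_le_or) (Nat.zero_le r)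
      have hx : hd.1.toNat ^^^ hd.2.toNat = 0 :=
        Nat.le_antisymm (h0 ▸ Nat.right_le_or) (Nat.zero_le _)
      refine ⟨hr, fun p hp => ?_⟩
      rcases hp with rfl | hp
      · exact Char.ext (UInt32.toNat_inj.mp (Nat.xor_eq_zero_iff.mp hx))
      · exact hall p hp
    · rintro ⟨rfl, hall⟩
      have : hd.1 = hd.2 := hall hd (Or.inl rfl)
      refine ⟨by simp [this], fun p hp => hall p (Or.inr hp)⟩

-- two lists are equal iff they have the same length and every zipped pair agrees
theorem list_eq_iff_len_zip (xs ys : List Char) :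
    xs = ys ↔ xs.length = ys.length ∧ ∀ p ∈ xs.zip ys, p.1 = p.2 := by
  constructor
  · rintro rfl
    refine ⟨rfl, fun p hp => ?_⟩
    obtain ⟨i, hi, hi'⟩ := List.getElem_of_mem hp
    rw [List.getElem_zip] at hi'
    rw [← hi']
  · rintro ⟨hlen, hall⟩
    apply List.ext_getElem hlen
    intro i h1 h2
    have hz : i < (xs.zip ys).length := by rw [List.length_zip]; omega
    have hg : (xs.zip ys)[i]'hz = (xs[i], ys[i]) := List.getElem_zip
    have hm : (xs[i], ys[i]) ∈ xs.zip ys := hg ▸ List.getElem_mem hz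
    exact hall _ hm

-- ===== VERDICT (by name: the statement is the Claim_ definition above) =====
theorem verify_hmac_spec : Claim_equal_verify_hmac := by
  intro eh ch _
  unfold Spec_verify_hmac verify_hmac verify_hmac_alt
  set e := PySem.Chars.strip (PySem.Chars.lower eh.toList) with he
  set c := PySem.Chars.strip (PySem.Chars.lower ch.toList) with hc
  by_cases hlen : e.length = c.length
  · simp only [hlen, ne_eq, not_true_eq_false, if_false]
    have h := hmac_foldl_zero_iff (e.zip c) 0
    simp only [Nat.cast_zero, true_and, PySem.Int.bxor_natCast] at h
    by_cases heq : e = c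
    · have hall : ∀ p ∈ e.zip c, p.1 = p.2 := ((list_eq_iff_len_zip e c).mp heq).2
      rw [heq] at h hall
      simp [heq, h.mpr hall]
    · have hne : ¬ (e.zip c).foldl (fun r p => PySem.Int.bor r (PySem.Int.bxor (p.1.toNat : Int) (p.2.toNat : Int))) 0 = 0 := by
        intro h0
        exact heq ((list_eq_iff_len_zip e c).mpr ⟨hlen, h.mp h0⟩)
      simp only [PySem.Int.bxor_natCast] at hne
      simp [hne, heq]
  · simp only [hlen, ne_eq, not_false_eq_true, if_true]
    have : e ≠ c := fun h => hlen (h ▸ rfl)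
    simp [this]
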